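-- pv_equiv track=rewrite | github.com/AshishRastogi123/Data_structure_with_Python | Array/Longest_consicuent_secuence.py | Longest_con_seq
-- ===== SOURCE A (Python) =====
-- def Longest_con_seq(nums):
--     """
--     Time Complexity: O(nlog(n))
--     space complexity: O(n)
--     """
--     nums.sort()
--     last_smaller=float("-inf")
--     count=0
--     longest=0
--     n=len(nums)
--     for i in range(n):
--         num=nums[i]
--         if num-1==last_smaller:
--             count+=1
--             last_smaller=num
--         elif num!=last_smaller:
--             count=1
--             last_smaller=num
--         if count>longest:
--             longest=count
--     return longest
-- ===== SOURCE B (Python) =====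
-- def Longest_con_seq(nums):
--     s = set(nums)
--     longest = 0
--     for num in s:
--         if num - 1 not in s:
--             length = 1
--             while num + length in s:
--                 length += 1
--             if length > longest:
--                 longest = length
--     return longest
-- ===== Notes on version B (the rewrite author's own statement) =====
-- stated objective: alternative
-- what changed: Replaces sort-then-scan (in-place sort plus a linear pass tracking the previous value) with the classic hash-set method: for each run start (num-1 absent from the set) count forward through the set; asymptotically O(n) expected but not measurably faster here, so no speed is claimed.
import Mathlib
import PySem

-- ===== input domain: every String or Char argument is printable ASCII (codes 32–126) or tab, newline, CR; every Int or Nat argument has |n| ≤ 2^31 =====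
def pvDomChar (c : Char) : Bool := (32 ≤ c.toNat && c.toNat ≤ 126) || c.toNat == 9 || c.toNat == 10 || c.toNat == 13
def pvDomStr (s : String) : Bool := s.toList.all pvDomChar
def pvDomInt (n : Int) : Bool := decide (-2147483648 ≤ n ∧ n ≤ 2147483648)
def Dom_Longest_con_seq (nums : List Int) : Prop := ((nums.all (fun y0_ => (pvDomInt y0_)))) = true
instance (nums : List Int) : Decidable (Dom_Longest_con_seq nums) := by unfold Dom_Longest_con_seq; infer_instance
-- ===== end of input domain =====

-- B replaces A's sort-then-scan with a hash-set walk from each run start (a different algorithm, no speed claimed);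
-- A sorts its argument in place (a side effect B does not have): the equivalence proved here is about the RETURN value only.

-- ===== PORT A =====
-- literal port of A: sort, then scan with (last_smaller, count, longest); none plays float("-inf")
def Longest_con_seq (nums : List Int) : Int :=
  let sortedNums := PySem.List.sorted nums (fun x => x) false
  let n : Int := (sortedNums.length : Int)
  let st := (PySem.List.pyRange 0 n 1).foldl
    (fun (st : Option Int × Int × Int) i =>
      let num := PySem.List.pyGetD sortedNums i 0
      let last_smaller := st.1
      let count := st.2.1
      let longest := st.2.2
      let p : Option Int × Int :=
        if some (num - 1) = last_smaller then (some num, count + 1)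
        else if some num ≠ last_smaller then (some num, 1)
        else (last_smaller, count)
      (p.1, p.2, if p.2 > longest then p.2 else longest))
    (none, 0, 0)
  st.2.2

-- ===== PORT B =====
-- the 'while num + length in s' loop of Source B; fuel s.length is enough for the loop to finish
-- (the run starting at num has at most s.length members), so this is exact
def pvWhile (s : List Int) (num : Int) : Nat → Int → Int
  | 0, length => length
  | fuel+1, length => if (num + length) ∈ s then pvWhile s num fuel (length + 1) else length

def Longest_con_seq_alt (nums : List Int) : Int :=
  let s := PySem.Set.ofList nums
  s.foldl
    (fun longest num =>
      if (num - 1) ∈ s then longest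
      else
        let length := pvWhile s num s.length 1
        if length > longest then length else longest)
    0

-- ===== PRECONDITION & SPEC =====
def Spec_Longest_con_seq (nums : List Int) (out : Int) : Prop := out = Longest_con_seq_alt nums
instance (nums : List Int) (out : Int) : Decidable (Spec_Longest_con_seq nums out) := by unfold Spec_Longest_con_seq; infer_instance

-- ===== CLAIM (what is proved, stated in full; the proofs are below) =====
def Claim_equal_Longest_con_seq : Prop := ∀ (nums : List Int), Dom_Longest_con_seq nums → Spec_Longest_con_seq nums (Longest_con_seq nums)

-- ===== LEMMAS AND PROOFS =====

-- the scan of A, abstracted: prev = last_smaller, c = count; returns the max count ever reached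
def goA (prev c : Int) : List Int → Int
  | [] => c
  | y :: ys => if y = prev + 1 then goA y (c+1) ys else if y = prev then goA prev c ys else max c (goA y 1 ys)

-- drop duplicates from a ≤-sorted list (prev = value just before the list)
def strip (p : Int) : List Int → List Int
  | [] => []
  | y :: ys => if y = p then strip p ys else y :: strip y ys

-- split off the longest prefix continuing the run p+1, p+2, …
def runSplit (p : Int) : List Int → Nat × List Int
  | [] => (0, [])
  | y :: ys => if y = p + 1 then ((runSplit y ys).1 + 1, (runSplit y ys).2) else (0, y :: ys)

lemma runSplit_snd_length : ∀ (l : List Int) (p : Int), (runSplit p l).2.length ≤ l.length := by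
  intro l
  induction l with
  | nil => intro p; simp [runSplit]
  | cons y ys ih =>
    intro p
    by_cases h : y = p + 1 <;> simp [runSplit, h]
    exact le_trans (ih (p+1)) (Nat.le_succ _)

-- the reference value: max run length of a strictly sorted list
def specMax : List Int → Int
  | [] => 0
  | x :: xs => max (1 + ((runSplit x xs).1 : Int)) (specMax (runSplit x xs).2)
termination_by l => l.length
decreasing_by
  exact Nat.lt_succ_of_le (runSplit_snd_length xs x)

-- forward run length from x in set s, with fuel
def runF (s : List Int) : Int → Nat → Nat
  | _, 0 => 0
  | x, n+1 => if x ∈ s then runF s (x+1) n + 1 else 0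

def chain (p : Int) (k : Nat) : List Int := (List.range k).map (fun i : Nat => p + 1 + (i : Int))

-- the B-side fold step, after pvWhile is rewritten
def stepB (s : List Int) (N : Nat) (a x : Int) : Int :=
  if (x - 1) ∈ s then a else max a (1 + ((runF s (x+1) N : Nat) : Int))

lemma pvWhile_eq (s : List Int) (num : Int) : ∀ (f : Nat) (len : Int),
    pvWhile s num f len = len + ((runF s (num + len) f : Nat) : Int) := by
  intro f
  induction f with
  | zero => intro len; simp [pvWhile, runF]
  | succ f ih =>
    intro len
    by_cases h : (num + len) ∈ s
    · simp only [pvWhile, runF, if_pos h, ih (len + 1)]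
      have : num + (len + 1) = num + len + 1 := by ring
      rw [this]; push_cast; omega
    · simp [pvWhile, runF, h]

lemma runF_congr (s t : List Int) : ∀ (n : Nat) (x : Int),
    (∀ w, x ≤ w → (w ∈ s ↔ w ∈ t)) → runF s x n = runF t x n := by
  intro n
  induction n with
  | zero => intro x _; rfl
  | succ n ih =>
    intro x hx
    have hmem : (x ∈ s) ↔ (x ∈ t) := hx x le_rfl
    by_cases h : x ∈ s
    · simp only [runF, if_pos h, if_pos (hmem.mp h)]
      rw [ih (x+1) (fun w hw => hx w (by omega))]
    · simp only [runF, if_neg h, if_neg (fun h' => h (hmem.mpr h'))]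

lemma runF_exact (s : List Int) : ∀ (m : Nat) (z : Int) (n : Nat),
    (∀ i : Nat, i < m → (z + (i : Int)) ∈ s) → (z + (m : Int)) ∉ s → m + 1 ≤ n → runF s z n = m := by
  intro m
  induction m with
  | zero =>
    intro z n _ h0 hn
    obtain ⟨n', rfl⟩ : ∃ n', n = n' + 1 := ⟨n - 1, by omega⟩
    have : z ∉ s := by simpa using h0
    simp [runF, this]
  | succ m ih =>
    intro z n hmem hstop hn
    obtain ⟨n', rfl⟩ : ∃ n', n = n' + 1 := ⟨n - 1, by omega⟩
    have hz : z ∈ s := by simpa using hmem 0 (by omega)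
    simp only [runF, if_pos hz]
    rw [ih (z+1) n' (fun i hi => by
        have h1 : z + 1 + (i:Int) = z + (((i+1 : Nat)):Int) := by push_cast; ring
        rw [h1]; exact hmem (i+1) (by omega))
      (by
        have h1 : z + 1 + (m:Int) = z + (((m+1 : Nat)):Int) := by push_cast; ring
        rw [h1]; exact hstop) (by omega)]

lemma goA_ge : ∀ (l : List Int) (prev c : Int), c ≤ goA prev c l := by
  intro l
  induction l with
  | nil => intro prev c; simp [goA]
  | cons y ys ih =>
    intro prev c
    simp only [goA]
    split_ifs with h1 h2
    · calc c ≤ c + 1 := by omega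
        _ ≤ goA y (c+1) ys := ih y (c+1)
    · exact ih prev c
    · exact le_max_left _ _

lemma goA_strip : ∀ (l : List Int) (prev c : Int), l.Pairwise (· ≤ ·) → (∀ z ∈ l, prev ≤ z) →
    goA prev c l = goA prev c (strip prev l) := by
  intro l
  induction l with
  | nil => intro prev c _ _; simp [strip]
  | cons y ys ih =>
    intro prev c hs hge
    have hys : ys.Pairwise (· ≤ ·) := (List.pairwise_cons.mp hs).2
    have hyle : ∀ z ∈ ys, y ≤ z := (List.pairwise_cons.mp hs).1
    by_cases h : y = prev
    · subst h
      simp only [strip, if_pos rfl, if_true, goA]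
      have h1 : ¬ (y = y + 1) := by omega
      simp only [if_neg h1, if_pos rfl, if_true]
      exact ih y c hys hyle
    · have hgt : prev < y := lt_of_le_of_ne (hge y (List.mem_cons_self)) (Ne.symm h)
      simp only [strip, if_neg h, goA]
      split_ifs with h1
      · exact ih y (c+1) hys hyle
      · rw [ih y 1 hys hyle]

lemma mem_strip : ∀ (l : List Int) (p : Int), l.Pairwise (· ≤ ·) → (∀ z ∈ l, p ≤ z) →
    ∀ z, (z ∈ strip p l ↔ z ∈ l ∧ z ≠ p) := by
  intro l
  induction l with
  | nil => intro p _ _ z; simp [strip]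
  | cons y ys ih =>
    intro p hs hge z
    have hys : ys.Pairwise (· ≤ ·) := (List.pairwise_cons.mp hs).2
    have hyle : ∀ w ∈ ys, y ≤ w := (List.pairwise_cons.mp hs).1
    by_cases h : y = p
    · subst h
      simp only [strip, if_pos rfl, if_true]
      rw [ih y hys hyle z]
      constructor
      · rintro ⟨hz, hne⟩; exact ⟨List.mem_cons_of_mem _ hz, hne⟩
      · rintro ⟨hz, hne⟩
        rcases List.mem_cons.mp hz with rfl | hz
        · exact absurd rfl hne
        · exact ⟨hz, hne⟩
    · have hgt : p < y := lt_of_le_of_ne (hge y (List.mem_cons_self)) (Ne.symm h)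
      simp only [strip, if_neg h]
      constructor
      · intro hz
        rcases List.mem_cons.mp hz with rfl | hz
        · exact ⟨List.mem_cons_self, h⟩
        · obtain ⟨hz', _⟩ := (ih y hys hyle z).mp hz
          have := hyle z hz'
          exact ⟨List.mem_cons_of_mem _ hz', by omega⟩
      · rintro ⟨hz, hne⟩
        rcases List.mem_cons.mp hz with rfl | hz
        · exact List.mem_cons_self
        · by_cases hzy : z = y
          · subst hzy; exact List.mem_cons_self
          · exact List.mem_cons_of_mem _ ((ih y hys hyle z).mpr ⟨hz, hzy⟩)

lemma strip_sorted : ∀ (l : List Int) (p : Int), l.Pairwise (· ≤ ·) → (∀ z ∈ l, p ≤ z) →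
    (strip p l).Pairwise (· < ·) ∧ (∀ z ∈ strip p l, p < z) := by
  intro l
  induction l with
  | nil => intro p _ _; simp [strip]
  | cons y ys ih =>
    intro p hs hge
    have hys : ys.Pairwise (· ≤ ·) := (List.pairwise_cons.mp hs).2
    have hyle : ∀ w ∈ ys, y ≤ w := (List.pairwise_cons.mp hs).1
    by_cases h : y = p
    · subst h; simp only [strip, if_pos rfl, if_true]; exact ih y hys hyle
    · have hgt : p < y := lt_of_le_of_ne (hge y (List.mem_cons_self)) (Ne.symm h)
      simp only [strip, if_neg h]
      obtain ⟨hp, hgt'⟩ := ih y hys hyle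
      refine ⟨List.pairwise_cons.mpr ⟨hgt', hp⟩, ?_⟩
      intro z hz
      rcases List.mem_cons.mp hz with rfl | hz
      · exact hgt
      · exact lt_trans hgt (hgt' z hz)

lemma runSplit_nonneg (l : List Int) (p : Int) : (0:Int) ≤ ((runSplit p l).1 : Int) := by
  positivity

lemma specMax_nonneg : ∀ (l : List Int), 0 ≤ specMax l := by
  intro l
  induction l using specMax.induct with
  | case1 => simp [specMax]
  | case2 x xs ih =>
    rw [specMax]
    have := runSplit_nonneg xs x
    omega

lemma goA_spec : ∀ (l : List Int) (prev c : Int), l.Pairwise (· < ·) → (∀ z ∈ l, prev < z) → 1 ≤ c →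
    goA prev c l = max (c + ((runSplit prev l).1 : Int)) (specMax (runSplit prev l).2) := by
  intro l
  induction l with
  | nil =>
    intro prev c _ _ hc
    simp only [goA, runSplit, specMax]
    omega
  | cons y ys ih =>
    intro prev c hs hgt hc
    have hys : ys.Pairwise (· < ·) := (List.pairwise_cons.mp hs).2
    have hylt : ∀ w ∈ ys, y < w := (List.pairwise_cons.mp hs).1
    have hy : prev < y := hgt y (List.mem_cons_self)
    by_cases h : y = prev + 1
    · simp only [goA, if_pos h, runSplit]
      rw [ih y (c+1) hys hylt (by omega)]
      subst h; push_cast; ring_nf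
    · have h2 : ¬ (y = prev) := by omega
      simp only [goA, if_pos, if_neg h, if_neg h2, runSplit]
      rw [ih y 1 hys hylt le_rfl]
      rw [specMax]
      have h3 := runSplit_nonneg ys y
      have h4 := specMax_nonneg (runSplit y ys).2
      push_cast
      omega

lemma chain_succ (p : Int) (k : Nat) : chain p (k+1) = (p+1) :: chain (p+1) k := by
  unfold chain
  rw [List.range_succ_eq_map, List.map_cons, List.map_map]
  congr 1
  · push_cast; ring
  · apply List.map_congr_left
    intro i _
    simp only [Function.comp_apply]
    push_cast; ring

lemma mem_chain (p : Int) (k : Nat) (z : Int) : z ∈ chain p k ↔ p + 1 ≤ z ∧ z ≤ p + (k : Nat) := by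
  unfold chain
  simp only [List.mem_map, List.mem_range]
  constructor
  · rintro ⟨i, hi, rfl⟩; constructor <;> omega
  · rintro ⟨h1, h2⟩
    exact ⟨(z - p - 1).toNat, by omega, by omega⟩

lemma runSplit_eq : ∀ (l : List Int) (p : Int), l = chain p (runSplit p l).1 ++ (runSplit p l).2 := by
  intro l
  induction l with
  | nil => intro p; simp [runSplit, chain]
  | cons y ys ih =>
    intro p
    by_cases h : y = p + 1
    · simp only [runSplit, if_pos h]
      rw [chain_succ]
      subst h
      rw [List.cons_append]
      exact congrArg _ (ih (p+1))
    · simp [runSplit, h, chain]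

lemma runSplit_stop : ∀ (l : List Int) (p z : Int) (zs : List Int),
    (runSplit p l).2 = z :: zs → z ≠ p + ((runSplit p l).1 : Int) + 1 := by
  intro l
  induction l with
  | nil => intro p z zs h; simp [runSplit] at h
  | cons y ys ih =>
    intro p z zs h
    by_cases hy : y = p + 1
    · simp only [runSplit, if_pos hy] at h ⊢
      have := ih y z zs h
      subst hy
      push_cast at this ⊢
      omega
    · simp only [runSplit, if_neg hy] at h ⊢
      obtain ⟨rfl, -⟩ := List.cons_eq_cons.mp h
      push_cast
      omega

lemma foldl_stepB_skip (s : List Int) (N : Nat) : ∀ (l : List Int) (a : Int),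
    (∀ y ∈ l, (y - 1) ∈ s) → List.foldl (stepB s N) a l = a := by
  intro l
  induction l with
  | nil => intro a _; rfl
  | cons y ys ih =>
    intro a h
    simp only [List.foldl_cons, stepB, if_pos (h y List.mem_cons_self)]
    exact ih a (fun w hw => h w (List.mem_cons_of_mem _ hw))

-- A's scan as a fold equals goA, tracking the running maximum
-- A's fold step, named (definitionally the lambda in the port)
def stepA (st : Option Int × Int × Int) (num : Int) : Option Int × Int × Int :=
  let p : Option Int × Int :=
    if some (num - 1) = st.1 then (some num, st.2.1 + 1)
    else if some num ≠ st.1 then (some num, 1)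
    else (st.1, st.2.1)
  (p.1, p.2, if p.2 > st.2.2 then p.2 else st.2.2)

lemma foldA_go : ∀ (l : List Int) (prev c L : Int), 1 ≤ c → c ≤ L →
    (List.foldl stepA (some prev, c, L) l).2.2 = max L (goA prev c l) := by
  -- stepA is definitionally the lambda below; prove the statement for the lambda
  have key : ∀ (l : List Int) (prev c L : Int), 1 ≤ c → c ≤ L →
      (List.foldl
        (fun (st : Option Int × Int × Int) (num : Int) =>
          let p : Option Int × Int :=
            if some (num - 1) = st.1 then (some num, st.2.1 + 1)
            else if some num ≠ st.1 then (some num, 1)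
            else (st.1, st.2.1)
          (p.1, p.2, if p.2 > st.2.2 then p.2 else st.2.2))
        (some prev, c, L) l).2.2 = max L (goA prev c l) := by
    intro l
    induction l with
    | nil =>
      intro prev c L hc hcL
      simp only [List.foldl_nil, goA]
      omega
    | cons y ys ih =>
      intro prev c L hc hcL
      simp only [List.foldl_cons]
      by_cases h1 : y = prev + 1
      · have he : some (y - 1) = some prev := by rw [Option.some.injEq]; omega
        simp only [if_pos he]
        rw [show (if c + 1 > L then c + 1 else L) = max L (c+1) from by omega]
        rw [ih y (c+1) (max L (c+1)) (by omega) (by omega)]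
        simp only [goA, if_pos h1]
        have := goA_ge ys y (c+1)
        omega
      · have he : ¬ (some (y - 1) = some prev) := by
          rw [Option.some.injEq]; omega
        by_cases h2 : y = prev
        · have he2 : ¬ (some y ≠ some prev) := by simp [h2]
          simp only [if_neg he, if_neg he2]
          rw [show (if c > L then c else L) = L from by omega]
          rw [ih prev c L hc hcL]
          simp only [goA, if_neg h1, if_pos h2]
        · have he2 : (some y ≠ some prev) := by simp [h2]
          simp only [if_neg he, if_pos he2]
          rw [show (if (1:Int) > L then 1 else L) = L from by omega]
          rw [ih y 1 L le_rfl (by omega)]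
          simp only [goA, if_neg h1, if_neg h2]
          have := goA_ge ys y 1
          omega
  exact key

-- the main B-side lemma: folding stepB over a strictly sorted list computes specMax
lemma fold_spec : ∀ (n : Nat) (d : List Int) (N : Nat) (acc : Int), d.length ≤ n →
    d.Pairwise (· < ·) → d.length ≤ N → 0 ≤ acc →
    List.foldl (stepB d N) acc d = max acc (specMax d) := by
  intro n
  induction n with
  | zero =>
    intro d N acc hn _ _ hacc
    have : d = [] := List.eq_nil_of_length_eq_zero (by omega)
    subst this
    simp [specMax]
    omega
  | succ n ih =>
    intro d N acc hn hs hN hacc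
    match d, hs with
    | [], _ => simp [specMax]; omega
    | x :: xs, hs =>
      have hxs : xs.Pairwise (· < ·) := (List.pairwise_cons.mp hs).2
      have hxlt : ∀ w ∈ xs, x < w := (List.pairwise_cons.mp hs).1
      obtain ⟨k, r, hkr⟩ : ∃ k r, runSplit x xs = (k, r) := ⟨_, _, rfl⟩
      have hdec : xs = chain x k ++ r := by
        have := runSplit_eq xs x
        rwa [hkr] at this
      -- membership characterisations
      have hmemd : ∀ z : Int, z ∈ x :: xs ↔ (x ≤ z ∧ z ≤ x + (k : Int)) ∨ z ∈ r := by
        intro z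
        rw [List.mem_cons, hdec, List.mem_append, mem_chain]
        constructor
        · rintro (rfl | ⟨h, _⟩ | h)
          · left; constructor <;> omega
          · left; omega
          · right; exact h
        · rintro (⟨h1, h2⟩ | h)
          · by_cases hz : z = x
            · left; exact hz
            · right; left; omega
          · right; right; exact h
      -- lower bound on elements of r
      have hrlb : ∀ w ∈ r, x + (k : Int) + 2 ≤ w := by
        intro w hw
        obtain ⟨z, zs, hrr⟩ : ∃ z zs, r = z :: zs := by
          cases hrc : r with
          | nil => rw [hrc] at hw; simp at hw
          | cons a b => exact ⟨a, b, rfl⟩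
        subst hrr
        have hz_stop : z ≠ x + (k : Int) + 1 := by
          have := runSplit_stop xs x z zs (by rw [hkr])
          rwa [hkr] at this
        have hz_mem : z ∈ xs := by rw [hdec]; exact List.mem_append_right _ List.mem_cons_self
        have hz_gt : x + (k : Int) < z := by
          by_cases hk0 : k = 0
          · have := hxlt z hz_mem; omega
          · have hxk : x + (k:Int) ∈ chain x k := by rw [mem_chain]; omega
            have hpw : List.Pairwise (· < ·) xs := hxs
            rw [hdec] at hpw
            exact (List.pairwise_append.mp hpw).2.2 (x + (k:Int)) hxk z List.mem_cons_self
        have hzw : z ≤ w := by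
          rcases List.mem_cons.mp hw with rfl | hw'
          · exact le_rfl
          · have hpw : List.Pairwise (· < ·) (z :: zs) := by
              rw [hdec] at hxs
              exact (List.pairwise_append.mp hxs).2.1
            exact le_of_lt ((List.pairwise_cons.mp hpw).1 w hw')
        omega
      -- first step: x is a run start
      have hx_start : (x - 1) ∉ (x :: xs) := by
        rw [hmemd]
        push_neg
        refine ⟨by omega, ?_⟩
        intro hmem
        have := hrlb _ hmem; omega
      have hrunF : runF (x :: xs) (x+1) N = k := by
        apply runF_exact
        · intro i hi
          rw [hmemd]
          left; constructor <;> [omega; omega]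
        · rw [hmemd]
          push_neg
          refine ⟨by omega, ?_⟩
          intro hmem
          have := hrlb _ hmem
          omega
        · have : (x :: xs).length = 1 + (chain x k).length + r.length := by
            rw [hdec]; simp [List.length_append]; omega
          have hck : (chain x k).length = k := by simp [chain]
          omega
      have hstep1 : stepB (x :: xs) N acc x = max acc (1 + (k : Int)) := by
        unfold stepB
        rw [if_neg hx_start, hrunF]
      -- the rest of the chain is skipped
      have hchain_skip : List.foldl (stepB (x :: xs) N) (max acc (1 + (k:Int))) (chain x k)
          = max acc (1 + (k:Int)) := by
        apply foldl_stepB_skip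
        intro y hy
        rw [mem_chain] at hy
        rw [hmemd]
        left; omega
      -- on r, membership in d and in r agree for the queried values
      have hcongr : ∀ (a : Int), ∀ y ∈ r, stepB (x :: xs) N a y = stepB r N a y := by
        intro a y hy
        have hylb := hrlb y hy
        unfold stepB
        have hmem_iff : ((y - 1) ∈ (x :: xs)) ↔ ((y - 1) ∈ r) := by
          rw [hmemd]
          constructor
          · rintro (⟨h1, h2⟩ | h)
            · omega
            · exact h
          · intro h; right; exact h
        have hrunF_eq : runF (x :: xs) (y+1) N = runF r (y+1) N := by
          apply runF_congr
          intro w hw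
          rw [hmemd]
          constructor
          · rintro (⟨h1, h2⟩ | h)
            · omega
            · exact h
          · intro h; right; exact h
        rw [hrunF_eq]
        by_cases hin : (y - 1) ∈ r
        · rw [if_pos (hmem_iff.mpr hin), if_pos hin]
        · rw [if_neg (fun h => hin (hmem_iff.mp h)), if_neg hin]
      -- assemble
      have hr_pw : r.Pairwise (· < ·) := by
        rw [hdec] at hxs
        exact (List.pairwise_append.mp hxs).2.1
      have hrlen : r.length ≤ xs.length := by
        have := runSplit_snd_length xs x
        rwa [hkr] at this
      have hlen : (x :: xs).length = xs.length + 1 := rfl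
      calc List.foldl (stepB (x :: xs) N) acc (x :: xs)
          = List.foldl (stepB (x :: xs) N) (stepB (x :: xs) N acc x) (chain x k ++ r) := by
            rw [List.foldl_cons, ← hdec]
        _ = List.foldl (stepB (x :: xs) N) (max acc (1 + (k:Int))) r := by
            rw [hstep1, List.foldl_append, hchain_skip]
        _ = List.foldl (stepB r N) (max acc (1 + (k:Int))) r := by
            apply PySem.List.foldl_congr_mem
            exact hcongr
        _ = max (max acc (1 + (k:Int))) (specMax r) := by
            apply ih r N _ (by simp at hn ⊢; omega) hr_pw (by simp at hN ⊢; omega) (by omega)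
        _ = max acc (specMax (x :: xs)) := by
            rw [specMax, hkr]
            dsimp only
            have h1 := specMax_nonneg r
            have h2 : (0:Int) ≤ (k : Int) := by positivity
            omega

-- B's fold step, named (definitionally the lambda in the port)
def stepB0 (s : List Int) (longest num : Int) : Int :=
  if (num - 1) ∈ s then longest
  else
    let length := pvWhile s num s.length 1
    if length > longest then length else longest

lemma dA_eq (nums : List Int) (y : Int) (ys : List Int)
    (hL : PySem.List.sorted nums (fun x => x) false = y :: ys) :
    PySem.List.sorted (PySem.Set.ofList nums) (fun x => x) false = y :: strip y ys := by
  have hpar : (y :: ys).Pairwise (· ≤ ·) := by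
    have := PySem.List.sorted_pairwise nums (fun x => x)
    rwa [hL] at this
  have hys : ys.Pairwise (· ≤ ·) := (List.pairwise_cons.mp hpar).2
  have hyle : ∀ z ∈ ys, y ≤ z := (List.pairwise_cons.mp hpar).1
  obtain ⟨hpw, hgt⟩ := strip_sorted ys y hys hyle
  have hlt : (y :: strip y ys).Pairwise (· < ·) := List.pairwise_cons.mpr ⟨hgt, hpw⟩
  apply PySem.List.sorted_eq_of_perm_of_pairwise_lt
  · rw [List.perm_ext_iff_of_nodup]
    · intro z
      rw [List.mem_cons, mem_strip ys y hys hyle z, PySem.Set.mem_ofList]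
      have hz : z ∈ nums ↔ z ∈ y :: ys := by
        rw [← hL, PySem.List.mem_sorted]
      rw [hz, List.mem_cons]
      constructor
      · rintro (rfl | ⟨h, _⟩)
        · exact Or.inl rfl
        · exact Or.inr h
      · rintro (rfl | h)
        · exact Or.inl rfl
        · by_cases hzy : z = y
          · exact Or.inl hzy
          · exact Or.inr ⟨h, hzy⟩
    · exact hlt.imp ne_of_lt
    · exact PySem.Set.nodup_ofList nums
  · exact hlt

lemma A_eq_spec (nums : List Int) :
    Longest_con_seq nums =
      specMax (PySem.List.sorted (PySem.Set.ofList nums) (fun x => x) false) := by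
  show (List.foldl
      (fun (st : Option Int × Int × Int) (i : Int) =>
        stepA st (PySem.List.pyGetD (PySem.List.sorted nums (fun x => x) false) i 0))
      (none, 0, 0)
      (PySem.List.pyRange 0 ((PySem.List.sorted nums (fun x => x) false).length : Int) 1)).2.2
    = specMax (PySem.List.sorted (PySem.Set.ofList nums) (fun x => x) false)
  rw [PySem.List.foldl_pyRange_zero_pyGetD' (PySem.List.sorted nums (fun x => x) false) 0 stepA]
  cases hL : PySem.List.sorted nums (fun x => x) false with
  | nil =>
    have hnil : nums = [] := (PySem.List.sorted_eq_nil_iff nums _ false).mp hL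
    subst hnil
    have h0 : PySem.List.sorted (PySem.Set.ofList ([]:List Int)) (fun x : Int => x) false = [] := by
      rw [PySem.List.sorted_eq_nil_iff]; rfl
    rw [h0]
    simp [specMax]
  | cons y ys =>
    rw [dA_eq nums y ys hL]
    have hpar : (y :: ys).Pairwise (· ≤ ·) := by
      have := PySem.List.sorted_pairwise nums (fun x => x)
      rwa [hL] at this
    have hys : ys.Pairwise (· ≤ ·) := (List.pairwise_cons.mp hpar).2
    have hyle : ∀ z ∈ ys, y ≤ z := (List.pairwise_cons.mp hpar).1
    obtain ⟨hpw, hgt⟩ := strip_sorted ys y hys hyle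
    rw [List.foldl_cons]
    have h1 : stepA (none, 0, 0) y = (some y, 1, 1) := by
      have hne : ¬ (some (y - 1) = (none : Option Int)) := by simp
      have hne2 : (some y ≠ (none : Option Int)) := by simp
      simp only [stepA, if_neg hne, if_pos hne2]
      norm_num
    rw [h1, foldA_go ys y 1 1 le_rfl le_rfl]
    rw [goA_strip ys y 1 hys hyle]
    rw [goA_spec (strip y ys) y 1 hpw hgt le_rfl]
    conv_rhs => rw [specMax]
    have hk : (0:Int) ≤ ((runSplit y (strip y ys)).1 : Int) := by positivity
    omega

lemma B_eq_spec (nums : List Int) :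
    Longest_con_seq_alt nums =
      specMax (PySem.List.sorted (PySem.Set.ofList nums) (fun x => x) false) := by
  show List.foldl (stepB0 (PySem.Set.ofList nums)) 0 (PySem.Set.ofList nums)
    = specMax (PySem.List.sorted (PySem.Set.ofList nums) (fun x => x) false)
  have hfun : ∀ (s : List Int) (a x : Int), stepB0 s a x = stepB s s.length a x := by
    intro s a x
    unfold stepB0 stepB
    by_cases h : (x - 1) ∈ s
    · rw [if_pos h, if_pos h]
    · rw [if_neg h, if_neg h, pvWhile_eq s x s.length 1]
      dsimp only
      omega
  set s := PySem.Set.ofList nums with hsdef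
  set d := PySem.List.sorted s (fun x => x) false with hddef
  have hperm : s.Perm d := (PySem.List.sorted_perm s (fun x => x) false).symm
  have hcomm : RightCommutative (stepB s s.length) := by
    constructor
    intro b a₁ a₂
    unfold stepB
    split_ifs <;> omega
  calc List.foldl (stepB0 s) 0 s
      = List.foldl (stepB s s.length) 0 s := by
        apply PySem.List.foldl_congr_mem
        intro a x _
        exact hfun s a x
    _ = List.foldl (stepB s s.length) 0 d := @List.Perm.foldl_eq _ _ _ _ _ hcomm hperm 0
    _ = List.foldl (stepB d s.length) 0 d := by
        apply PySem.List.foldl_congr_mem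
        intro a x _
        have hmem : ∀ z : Int, z ∈ s ↔ z ∈ d := by
          intro z
          rw [hddef, PySem.List.mem_sorted]
        unfold stepB
        rw [runF_congr s d s.length (x+1) (fun w _ => hmem w)]
        by_cases h : (x - 1) ∈ s
        · rw [if_pos h, if_pos ((hmem _).mp h)]
        · rw [if_neg h, if_neg (fun h' => h ((hmem _).mpr h'))]
    _ = max 0 (specMax d) := by
        apply fold_spec d.length d s.length 0 le_rfl
        · rw [hddef]
          exact PySem.List.sorted_ofList_pairwise_lt nums
        · rw [hddef, PySem.List.length_sorted]
        · omega
    _ = specMax d := by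
        have := specMax_nonneg d
        omega

-- ===== VERDICT (by name: the statement is the Claim_ definition above) =====
theorem Longest_con_seq_spec : Claim_equal_Longest_con_seq := by
  intro nums _
  unfold Spec_Longest_con_seq
  rw [A_eq_spec, B_eq_spec]
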